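-- pv_equiv track=rewrite | github.com/FedorMilovanov/bible-bot | database.py | compute_bonus
-- ===== SOURCE A (Python) =====
-- def compute_bonus(score: int, mode: str, eligible: bool) -> int:
--     if not eligible:
--         return 0
--     if mode == "random20":
--         thresholds = [
--             (20, 100), (19, 80), (18, 60),
--             (17, 40), (16, 25), (15, 10),
--         ]
--     else:
--         thresholds = [
--             (20, 200), (19, 150), (18, 110),
--             (17, 80), (16, 50), (15, 25),
--         ]
--     for min_score, bonus in thresholds:
--         if score >= min_score:
--             return bonus
--     return 0
-- ===== SOURCE B (Python) =====
-- _BONUS = {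
--     "random20": {15: 10, 16: 25, 17: 40, 18: 60, 19: 80, 20: 100},
-- }
-- _DEFAULT = {15: 25, 16: 50, 17: 80, 18: 110, 19: 150, 20: 200}
--
-- def compute_bonus(score: int, mode: str, eligible: bool) -> int:
--     if not eligible:
--         return 0
--     table = _BONUS.get(mode, _DEFAULT)
--     return table.get(min(score, 20), 0)
-- ===== Notes on version B (the rewrite author's own statement) =====
-- stated objective: simpler
-- what changed: The linear first-match scan over a threshold list is replaced by a constant-time table lookup keyed by the score clamped to 20, with .get default 0 covering scores below 15.
import Mathlib
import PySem

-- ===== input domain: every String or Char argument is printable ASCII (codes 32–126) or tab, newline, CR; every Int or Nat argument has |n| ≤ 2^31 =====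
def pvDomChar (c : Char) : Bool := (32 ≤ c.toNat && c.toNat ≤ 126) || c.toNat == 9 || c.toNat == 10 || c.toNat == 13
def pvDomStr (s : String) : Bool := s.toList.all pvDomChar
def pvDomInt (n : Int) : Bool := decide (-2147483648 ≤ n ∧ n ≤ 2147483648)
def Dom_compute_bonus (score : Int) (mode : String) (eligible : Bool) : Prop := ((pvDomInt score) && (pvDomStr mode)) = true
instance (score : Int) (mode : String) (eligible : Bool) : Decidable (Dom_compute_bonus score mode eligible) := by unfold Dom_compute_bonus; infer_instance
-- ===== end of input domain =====

-- B replaces A's linear first-match threshold scan with a clamp-to-20 plus a table lookup with default 0 (simpler).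


-- ===== PORT A =====
-- the for-loop with early return, as structural recursion over the threshold list
def pvScanA (score : Int) : List (Int × Int) → Int
  | [] => 0
  | (minScore, bonus) :: rest => if score ≥ minScore then bonus else pvScanA score rest

def compute_bonus (score : Int) (mode : String) (eligible : Bool) : Int :=
  if ¬ eligible then 0
  else
    let thresholds : List (Int × Int) :=
      if mode == "random20" then
        [(20, 100), (19, 80), (18, 60), (17, 40), (16, 25), (15, 10)]
      else
        [(20, 200), (19, 150), (18, 110), (17, 80), (16, 50), (15, 25)]
    pvScanA score thresholds

-- ===== PORT B =====
def pvR20 : PySem.Dict Int Int :=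
  ⟨[(15, 10), (16, 25), (17, 40), (18, 60), (19, 80), (20, 100)]⟩

def pvDEFAULT : PySem.Dict Int Int :=
  ⟨[(15, 25), (16, 50), (17, 80), (18, 110), (19, 150), (20, 200)]⟩

def pvBONUS : PySem.Dict String (PySem.Dict Int Int) :=
  ⟨[("random20", pvR20)]⟩

def compute_bonus_alt (score : Int) (mode : String) (eligible : Bool) : Int :=
  if ¬ eligible then 0
  else
    let table := PySem.Dict.getD pvBONUS mode pvDEFAULT
    PySem.Dict.getD table (min score 20) 0

-- ===== PRECONDITION & SPEC =====
def Spec_compute_bonus (score : Int) (mode : String) (eligible : Bool) (out : Int) : Prop := out = compute_bonus_alt score mode eligible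
instance (score : Int) (mode : String) (eligible : Bool) (out : Int) : Decidable (Spec_compute_bonus score mode eligible out) := by unfold Spec_compute_bonus; infer_instance

-- ===== CLAIM (what is proved, stated in full; the proofs are below) =====
def Claim_equal_compute_bonus : Prop := ∀ (score : Int) (mode : String) (eligible : Bool), Dom_compute_bonus score mode eligible → Spec_compute_bonus score mode eligible (compute_bonus score mode eligible)

-- ===== LEMMAS AND PROOFS =====
theorem scan_eq_lookup_r20 (score : Int) :
    pvScanA score [(20, 100), (19, 80), (18, 60), (17, 40), (16, 25), (15, 10)]
      = PySem.Dict.getD pvR20 (min score 20) 0 := by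
  simp only [pvScanA]
  by_cases hlo : score < 15
  · have hm : min score 20 = score := by omega
    simp only [pvR20, PySem.Dict.getD, PySem.Dict.get?, hm]
    rw [if_neg (by omega), if_neg (by omega), if_neg (by omega), if_neg (by omega), if_neg (by omega), if_neg (by omega)]
    have b15 : ((15:Int) == score) = false := by simp; omega
    have b16 : ((16:Int) == score) = false := by simp; omega
    have b17 : ((17:Int) == score) = false := by simp; omega
    have b18 : ((18:Int) == score) = false := by simp; omega
    have b19 : ((19:Int) == score) = false := by simp; omega
    have b20 : ((20:Int) == score) = false := by simp; omega
    simp [List.find?, b15, b16, b17, b18, b19, b20]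
  · by_cases hhi : 20 < score
    · have hm : min score 20 = 20 := by omega
      rw [hm, if_pos (by omega)]; decide
    · have h1 : 15 ≤ score := by omega
      have h2 : score ≤ 20 := by omega
      interval_cases score <;> decide

theorem scan_eq_lookup_def (score : Int) :
    pvScanA score [(20, 200), (19, 150), (18, 110), (17, 80), (16, 50), (15, 25)]
      = PySem.Dict.getD pvDEFAULT (min score 20) 0 := by
  simp only [pvScanA]
  by_cases hlo : score < 15
  · have hm : min score 20 = score := by omega
    simp only [pvDEFAULT, PySem.Dict.getD, PySem.Dict.get?, hm]
    rw [if_neg (by omega), if_neg (by omega), if_neg (by omega), if_neg (by omega), if_neg (by omega), if_neg (by omega)]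
    have b15 : ((15:Int) == score) = false := by simp; omega
    have b16 : ((16:Int) == score) = false := by simp; omega
    have b17 : ((17:Int) == score) = false := by simp; omega
    have b18 : ((18:Int) == score) = false := by simp; omega
    have b19 : ((19:Int) == score) = false := by simp; omega
    have b20 : ((20:Int) == score) = false := by simp; omega
    simp [List.find?, b15, b16, b17, b18, b19, b20]
  · by_cases hhi : 20 < score
    · have hm : min score 20 = 20 := by omega
      rw [hm, if_pos (by omega)]; decide
    · have h1 : 15 ≤ score := by omega
      have h2 : score ≤ 20 := by omega
      interval_cases score <;> decide

-- ===== VERDICT (by name: the statement is the Claim_ definition above) =====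
theorem compute_bonus_spec : Claim_equal_compute_bonus := by
  intro score mode eligible _
  unfold Spec_compute_bonus compute_bonus compute_bonus_alt
  cases eligible with
  | false => simp
  | true =>
    have hne : ¬¬(true = true) := fun h => h rfl
    rw [if_neg hne, if_neg hne]
    by_cases hm : mode = "random20"
    · subst hm
      simpa [pvBONUS, PySem.Dict.getD, PySem.Dict.get?, List.find?] using scan_eq_lookup_r20 score
    · have hb : (mode == "random20") = false := by simpa using hm
      have hb' : ("random20" == mode) = false := by rw [BEq.comm]; exact hb
      simp only [hb, Bool.false_eq_true, if_false]
      have : PySem.Dict.getD pvBONUS mode pvDEFAULT = pvDEFAULT := by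
        simp [pvBONUS, PySem.Dict.getD, PySem.Dict.get?, List.find?, hb']
      rw [this]
      exact scan_eq_lookup_def score
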